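-- pv_equiv track=rewrite | github.com/faccroot/pg_transformer_research | tools/torch_artifact_eval_utils.py | build_probe_windows
-- ===== SOURCE A (Python) =====
-- def build_probe_windows(total_tokens: int, seq_len: int, stride: int) -> list[tuple[int, int]]:
--     if seq_len <= 0:
--         raise ValueError(f"seq_len must be positive, got {seq_len}")
--     if stride <= 0:
--         raise ValueError(f"stride must be positive, got {stride}")
--     windows: list[tuple[int, int]] = []
--     for window_start in range(0, total_tokens, stride):
--         window_end = min(window_start + seq_len, total_tokens)
--         window_len = window_end - window_start
--         if window_len <= 0:
--             continue
--         windows.append((window_start, window_len))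
--         if window_end >= total_tokens:
--             break
--     if not windows:
--         raise ValueError("No probe windows could be built")
--     return windows
-- ===== SOURCE B (Python) =====
-- def build_probe_windows(total_tokens: int, seq_len: int, stride: int) -> list[tuple[int, int]]:
--     if seq_len <= 0:
--         raise ValueError(f"seq_len must be positive, got {seq_len}")
--     if stride <= 0:
--         raise ValueError(f"stride must be positive, got {stride}")
--     # index of the last window: smallest k >= 0 with k*stride + seq_len >= total_tokens
--     k_last = max(0, -(-(total_tokens - seq_len) // stride))
--     windows = [(s, min(seq_len, total_tokens - s))
--                for s in range(0, (k_last + 1) * stride, stride)]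
--     windows = [(s, l) for (s, l) in windows if l > 0]
--     if not windows:
--         raise ValueError("No probe windows could be built")
--     return windows
-- ===== Notes on version B (the rewrite author's own statement) =====
-- stated objective: alternative
-- what changed: Replaces the iterate-until-break loop by a closed-form ceiling-division computation of the last window index followed by a single comprehension over the resulting range plus a positivity filter.
import Mathlib
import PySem

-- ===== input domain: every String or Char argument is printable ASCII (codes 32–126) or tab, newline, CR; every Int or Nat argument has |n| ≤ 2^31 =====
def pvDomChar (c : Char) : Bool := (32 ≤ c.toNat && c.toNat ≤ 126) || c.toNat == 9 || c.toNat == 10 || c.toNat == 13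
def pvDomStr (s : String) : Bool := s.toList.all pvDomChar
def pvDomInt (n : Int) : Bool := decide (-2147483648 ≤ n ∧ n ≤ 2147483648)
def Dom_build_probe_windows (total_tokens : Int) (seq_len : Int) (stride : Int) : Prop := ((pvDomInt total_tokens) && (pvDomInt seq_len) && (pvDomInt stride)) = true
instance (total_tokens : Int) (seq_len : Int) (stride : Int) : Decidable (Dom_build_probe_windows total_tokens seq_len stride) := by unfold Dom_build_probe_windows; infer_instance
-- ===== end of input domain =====

-- B replaces A's iterate-until-break loop by a closed-form ceiling-division count of windows
-- plus one generation pass (objective: alternative; same asymptotic cost).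

-- ===== PORT A =====
-- the for-loop over range(0, total_tokens, stride) with `continue`/`break` and the
-- accumulator `windows`; tail-recursive on the current start (Python's range is lazy),
-- appending = cons onto the accumulator, reversed on exit
def bpwLoop (t sq st : Int) (hst : 0 < st) (ws : Int) (acc : List (Int × Int)) :
    List (Int × Int) :=
  if _h : ws < t then
    let we := min (ws + sq) t
    let wl := we - ws
    if wl ≤ 0 then bpwLoop t sq st hst (ws + st) acc              -- continue
    else if t ≤ we then ((ws, wl) :: acc).reverse                 -- append, then break
    else bpwLoop t sq st hst (ws + st) ((ws, wl) :: acc)          -- append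
  else acc.reverse
termination_by (t - ws).toNat
decreasing_by all_goals omega

def build_probe_windows (total_tokens : Int) (seq_len : Int) (stride : Int) : List (Int × Int) :=
  if seq_len ≤ 0 then []        -- Python raises ValueError; excluded by Pre_
  else if h : stride ≤ 0 then []    -- Python raises ValueError; excluded by Pre_
  else bpwLoop total_tokens seq_len stride (by omega) 0 []
  -- final `if not windows: raise ValueError`; the empty case is excluded by Pre_

-- ===== PORT B =====
def build_probe_windows_alt (total_tokens : Int) (seq_len : Int) (stride : Int) : List (Int × Int) :=
  if seq_len ≤ 0 then []        -- Python raises ValueError; excluded by Pre_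
  else if stride ≤ 0 then []    -- Python raises ValueError; excluded by Pre_
  else
    let k_last := max 0 (-(PySem.Int.floordiv (-(total_tokens - seq_len)) stride))
    let windows := (PySem.List.pyRange 0 ((k_last + 1) * stride) stride).map
        (fun s => (s, min seq_len (total_tokens - s)))
    windows.filter (fun p => decide (0 < p.2))
  -- final `if not windows: raise ValueError`; the empty case is excluded by Pre_

-- ===== PRECONDITION & SPEC =====
-- A raises ValueError when seq_len ≤ 0 or stride ≤ 0 (guards) and when no window is built,
-- which happens exactly when total_tokens ≤ 0; Pre_ excludes exactly those raising inputs.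
def Pre_build_probe_windows (total_tokens : Int) (seq_len : Int) (stride : Int) : Prop :=
  0 < total_tokens ∧ 0 < seq_len ∧ 0 < stride
instance (total_tokens : Int) (seq_len : Int) (stride : Int) : Decidable (Pre_build_probe_windows total_tokens seq_len stride) := by unfold Pre_build_probe_windows; infer_instance

def pvWitness_build_probe_windows : Int × Int × Int := (10, 4, 3)

def Spec_build_probe_windows (total_tokens : Int) (seq_len : Int) (stride : Int) (out : List (Int × Int)) : Prop := out = build_probe_windows_alt total_tokens seq_len stride
instance (total_tokens : Int) (seq_len : Int) (stride : Int) (out : List (Int × Int)) : Decidable (Spec_build_probe_windows total_tokens seq_len stride out) := by unfold Spec_build_probe_windows; infer_instance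

-- ===== CLAIM (what is proved, stated in full; the proofs are below) =====
def Claim_equal_build_probe_windows : Prop := ∀ (total_tokens : Int) (seq_len : Int) (stride : Int), Dom_build_probe_windows total_tokens seq_len stride → Pre_build_probe_windows total_tokens seq_len stride → Spec_build_probe_windows total_tokens seq_len stride (build_probe_windows total_tokens seq_len stride)

-- ===== LEMMAS AND PROOFS =====

lemma pyRange_nil_of_pos (a b st : Int) (hst : 0 < st) (h : b ≤ a) :
    PySem.List.pyRange a b st = [] := by
  rw [PySem.List.pyRange_of_pos a b hst, if_neg (by omega)]
  simp

lemma pyRange_cons_of_pos (a b st : Int) (hst : 0 < st) (hab : a < b) :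
    PySem.List.pyRange a b st = a :: PySem.List.pyRange (a + st) b st := by
  rw [PySem.List.pyRange_of_pos a b hst, PySem.List.pyRange_of_pos (a + st) b hst,
    if_pos hab]
  have hd : (b - a + st - 1) / st = (b - a - 1) / st + 1 := by
    have := Int.add_mul_ediv_right (b - a - 1) 1 (by omega : st ≠ 0)
    rw [one_mul] at this
    rw [← this]; ring_nf
  have hd0 : 0 ≤ (b - a - 1) / st := Int.ediv_nonneg (by omega) (by omega)
  by_cases h2 : a + st < b
  · rw [if_pos h2, hd]
    have ht : b - (a + st) + st - 1 = b - a - 1 := by ring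
    rw [ht]
    have : ((b - a - 1) / st + 1).toNat = ((b - a - 1) / st).toNat + 1 := by omega
    rw [this, List.range_succ_eq_map]
    simp only [List.map_cons, List.map_map]
    congr 1
    · simp
    · congr 1
      funext k
      simp only [Function.comp]
      push_cast
      ring
  · rw [if_neg h2, hd]
    have hz : (b - a - 1) / st = 0 := by
      apply Int.ediv_eq_zero_of_lt (by omega) (by omega)
    rw [hz]
    simp

lemma filter_pyRange_nil (t sq st a b : Int) (hst : 0 < st) (hta : t ≤ a) :
    ((PySem.List.pyRange a b st).map (fun s => (s, min sq (t - s)))).filter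
      (fun p => decide (0 < p.2)) = [] := by
  rw [List.filter_eq_nil_iff]
  intro x hx
  obtain ⟨s, hs, rfl⟩ := List.mem_map.mp hx
  have := (PySem.List.mem_pyRange_iff_of_pos hst s).mp hs
  simp only [decide_eq_true_eq]
  omega

lemma bpw_main (t sq st K : Int) (hsq : 0 < sq) (hst : 0 < st)
    (hK0 : 0 ≤ K)
    (hK : t - sq ≤ K * st)
    (hKmin : ∀ k : Int, 0 ≤ k → st * k < t - sq → k + 1 ≤ K)
    (hKle : ∀ k : Int, 0 ≤ k → t - sq ≤ st * k → K ≤ k) :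
    ∀ (n : ℕ) (a : Int) (acc : List (Int × Int)) (hst' : 0 < st),
      (t - a).toNat ≤ n → 0 ≤ a → st ∣ a → a ≤ K * st →
      bpwLoop t sq st hst' a acc
        = acc.reverse ++ ((PySem.List.pyRange a ((K + 1) * st) st).map
            (fun s => (s, min sq (t - s)))).filter (fun p => decide (0 < p.2)) := by
  intro n
  induction n with
  | zero =>
      intro a acc hst' hn h0 hd hKa
      have hta : t ≤ a := by omega
      rw [bpwLoop, dif_neg (by omega), filter_pyRange_nil t sq st a _ hst hta,
        List.append_nil]
  | succ n ih =>
      intro a acc hst' hn h0 hd hKa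
      by_cases hta : t ≤ a
      · rw [bpwLoop, dif_neg (by omega), filter_pyRange_nil t sq st a _ hst hta,
          List.append_nil]
      · push_neg at hta
        obtain ⟨j, rfl⟩ := hd
        have hj0 : 0 ≤ j := by
          by_contra hneg
          have : st * j < st * 0 := by
            apply mul_lt_mul_of_pos_left (by omega) hst
          omega
        have hKa' : st * j ≤ st * K := by rw [mul_comm st K]; exact hKa
        have e1 : (K + 1) * st = st * K + st := by ring
        have e2 : (j + 1) * st = st * j + st := by ring
        rw [bpwLoop, dif_pos hta,
            pyRange_cons_of_pos _ ((K + 1) * st) st hst (by omega)]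
        show (if min (st * j + sq) t - st * j ≤ 0 then bpwLoop t sq st hst' (st * j + st) acc
          else if t ≤ min (st * j + sq) t then
            ((st * j, min (st * j + sq) t - st * j) :: acc).reverse
          else bpwLoop t sq st hst' (st * j + st)
            ((st * j, min (st * j + sq) t - st * j) :: acc)) = _
        have hwl : ¬ (min (st * j + sq) t - st * j ≤ 0) := by omega
        rw [if_neg hwl]
        have hhead : min (st * j + sq) t - st * j = min sq (t - st * j) := by omega
        have hpos : decide (0 < ((st * j : Int), min sq (t - st * j)).2) = true := by
          simp only [decide_eq_true_eq]
          show 0 < min sq (t - st * j)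
          omega
        by_cases hbr : t ≤ min (st * j + sq) t
        · -- break branch: st * j is the last window start, both tails are empty
          rw [if_pos hbr]
          have hge : t - sq ≤ st * j := by omega
          have hjK : K ≤ j := hKle j hj0 hge
          have hjK' : j ≤ K := le_of_mul_le_mul_left hKa' hst
          have hjeq : j = K := le_antisymm hjK' hjK
          subst hjeq
          rw [List.map_cons, List.filter_cons, hpos,
              pyRange_nil_of_pos (st * j + st) ((j + 1) * st) st hst (by omega)]
          simp [hhead]
        · -- continue branch
          rw [if_neg hbr]
          push_neg at hbr
          have hlt : st * j < t - sq := by omega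
          have hjK : j + 1 ≤ K := hKmin j hj0 hlt
          have hnext : (j + 1) * st ≤ K * st :=
            mul_le_mul_of_nonneg_right hjK hst.le
          rw [ih (st * j + st) _ hst' (by omega) (by omega) ⟨j + 1, by ring⟩ (by omega),
              List.map_cons, List.filter_cons, hpos]
          simp [hhead]

-- ===== VERDICT (by name: the statement is the Claim_ definition above) =====
theorem build_probe_windows_spec : Claim_equal_build_probe_windows := by
  intro t sq st _ hpre
  obtain ⟨ht, hsq, hst⟩ := hpre
  unfold Spec_build_probe_windows build_probe_windows build_probe_windows_alt
  rw [if_neg (by omega : ¬ sq ≤ 0), dif_neg (by omega : ¬ st ≤ 0),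
    if_neg (by omega : ¬ sq ≤ 0), if_neg (by omega : ¬ st ≤ 0)]
  show bpwLoop t sq st (by omega) 0 []
      = ((PySem.List.pyRange 0
            ((max 0 (-(PySem.Int.floordiv (-(t - sq)) st)) + 1) * st) st).map
          (fun s => (s, min sq (t - s)))).filter (fun p => decide (0 < p.2))
  set C := -(PySem.Int.floordiv (-(t - sq)) st) with hCdef
  have hC : (C - 1) * st < t - sq ∧ t - sq ≤ C * st :=
    (PySem.Int.neg_floordiv_neg_eq_iff_of_pos hst).mp rfl
  set K := max 0 C with hKdef
  have hK0 : 0 ≤ K := le_max_left 0 C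
  have hCK : C ≤ K := le_max_right 0 C
  have hK : t - sq ≤ K * st :=
    le_trans hC.2 (mul_le_mul_of_nonneg_right hCK hst.le)
  have hKmin : ∀ k : Int, 0 ≤ k → st * k < t - sq → k + 1 ≤ K := by
    intro k hk hlt
    have h1 : k * st < C * st := by
      rw [mul_comm k st]; exact lt_of_lt_of_le hlt hC.2
    have h2 : k < C := lt_of_mul_lt_mul_right h1 hst.le
    omega
  have hKle : ∀ k : Int, 0 ≤ k → t - sq ≤ st * k → K ≤ k := by
    intro k hk hge
    have h1 : (C - 1) * st < k * st := by
      rw [mul_comm k st]; exact lt_of_lt_of_le hC.1 hge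
    have h2 : C - 1 < k := lt_of_mul_lt_mul_right h1 hst.le
    omega
  rw [bpw_main t sq st K hsq hst hK0 hK hKmin hKle (t - 0).toNat 0 [] (by omega)
    (by omega) le_rfl ⟨0, by ring⟩ (mul_nonneg hK0 hst.le)]
  rfl
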